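-- pv_equiv track=rewrite | github.com/LagaV/brother_ql_web | app/labeldesigner/markdown_processor.py | find_safe_cut_y_rows
-- ===== SOURCE A (Python) =====
-- from typing import List, Optional, Dict, Tuple
--
-- def find_safe_cut_y_rows(row_blank: List[bool], approx_y: int, window_px: int, min_blank_run: int) -> int:
--     h = len(row_blank)
--     if h == 0:
--         return approx_y
--     approx_y = max(0, min(approx_y, h - 1))
--     window_px = max(0, window_px)
--     min_blank_run = max(1, min_blank_run)
--
--     top = max(0, approx_y - window_px)
--     y = approx_y
--     while y >= top:
--         y0 = y - (min_blank_run // 2)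
--         y1 = y0 + min_blank_run
--         if y0 >= 0 and y1 <= h and all(row_blank[k] for k in range(y0, y1)):
--             return y1
--         y -= 1
--
--     bot = min(h, approx_y + window_px)
--     y = approx_y
--     while y < bot:
--         y0 = y - (min_blank_run // 2)
--         y1 = y0 + min_blank_run
--         if y0 >= 0 and y1 <= h and all(row_blank[k] for k in range(y0, y1)):
--             return y0
--         y += 1
--
--     return approx_y
-- ===== SOURCE B (Python) =====
-- def find_safe_cut_y_rows(row_blank, approx_y, window_px, min_blank_run):
--     h = len(row_blank)
--     if h == 0:
--         return approx_y
--     ay = max(0, min(approx_y, h - 1))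
--     wp = max(0, window_px)
--     mbr = max(1, min_blank_run)
--     half = mbr // 2
--     # one pass: run[i] = length of the blank run ending at row i
--     run = []
--     r = 0
--     for b in row_blank:
--         r = r + 1 if b else 0
--         run.append(r)
--
--     def ok(y):
--         y0 = y - half
--         y1 = y0 + mbr
--         return 0 <= y0 and y1 <= h and run[y1 - 1] >= mbr
--
--     top = max(0, ay - wp)
--     up = next((y for y in range(ay, top - 1, -1) if ok(y)), None)
--     if up is not None:
--         return up - half + mbr
--     bot = min(h, ay + wp)
--     down = next((y for y in range(ay, bot) if ok(y)), None)
--     if down is not None: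
--         return down - half
--     return ay
-- ===== Notes on version B (the rewrite author's own statement) =====
-- stated objective: faster
-- what changed: B precomputes in one pass the blank-run length ending at each row and tests every candidate window in O(1) against that table, and replaces A's early-return while-loops by first-match searches over the two candidate ranges.
import Mathlib
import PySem

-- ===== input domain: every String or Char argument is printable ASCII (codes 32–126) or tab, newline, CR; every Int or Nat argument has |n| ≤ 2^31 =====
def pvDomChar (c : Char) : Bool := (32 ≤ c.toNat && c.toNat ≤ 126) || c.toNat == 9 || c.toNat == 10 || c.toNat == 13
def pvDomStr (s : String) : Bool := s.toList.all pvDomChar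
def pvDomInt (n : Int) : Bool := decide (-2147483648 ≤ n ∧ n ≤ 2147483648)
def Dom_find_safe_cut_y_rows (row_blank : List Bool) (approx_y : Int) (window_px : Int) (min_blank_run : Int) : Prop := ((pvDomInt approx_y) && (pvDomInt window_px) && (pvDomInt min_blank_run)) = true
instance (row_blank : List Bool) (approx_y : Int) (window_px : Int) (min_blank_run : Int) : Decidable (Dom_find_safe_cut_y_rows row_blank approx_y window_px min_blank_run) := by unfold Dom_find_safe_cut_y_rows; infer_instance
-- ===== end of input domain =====

-- B replaces A's rescan of the window at every candidate row by one pass recording, for each row,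
-- the length of the blank run ending there, so each candidate is tested in O(1) (objective: faster).

-- ===== PORT A =====
-- the guard expression of A's two while-loops (textually identical in both loops)
def pvCheckA (row_blank : List Bool) (h mbr y : Int) : Bool :=
  let y0 := y - PySem.Int.floordiv mbr 2
  let y1 := y0 + mbr
  decide (0 ≤ y0) && decide (y1 ≤ h) &&
    (PySem.List.pyRange y0 y1 1).all (fun k => (PySem.List.pyGet? row_blank k).getD false)

-- A's first while-loop ('while y >= top', y decreasing), fuel = number of iterations
def pvLoopUpA (row_blank : List Bool) (h mbr : Int) : Nat → Int → Option Int
  | 0, _ => none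
  | n + 1, y =>
    if pvCheckA row_blank h mbr y then some (y - PySem.Int.floordiv mbr 2 + mbr)
    else pvLoopUpA row_blank h mbr n (y - 1)

-- A's second while-loop ('while y < bot', y increasing)
def pvLoopDownA (row_blank : List Bool) (h mbr : Int) : Nat → Int → Option Int
  | 0, _ => none
  | n + 1, y =>
    if pvCheckA row_blank h mbr y then some (y - PySem.Int.floordiv mbr 2)
    else pvLoopDownA row_blank h mbr n (y + 1)

def find_safe_cut_y_rows (row_blank : List Bool) (approx_y : Int) (window_px : Int) (min_blank_run : Int) : Int :=
  let h : Int := row_blank.length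
  if h = 0 then approx_y
  else
    let ay := max 0 (min approx_y (h - 1))
    let wp := max 0 window_px
    let mbr := max 1 min_blank_run
    let top := max 0 (ay - wp)
    match pvLoopUpA row_blank h mbr (ay - top + 1).toNat ay with
    | some r => r
    | none =>
      let bot := min h (ay + wp)
      match pvLoopDownA row_blank h mbr (bot - ay).toNat ay with
      | some r => r
      | none => ay

-- ===== PORT B =====
-- Source B's one-pass construction of run[i] = length of the blank run ending at row i
def pvBuildRuns (row_blank : List Bool) : List Int :=
  (row_blank.foldl (fun (st : Int × List Int) b =>
    let r := if b then st.1 + 1 else 0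
    (r, st.2 ++ [r])) (0, [])).2

-- Source B's 'ok(y)': O(1) window test via the run-length table
def pvOkB (runs : List Int) (h mbr half y : Int) : Bool :=
  let y0 := y - half
  let y1 := y0 + mbr
  decide (0 ≤ y0) && decide (y1 ≤ h) &&
    decide (mbr ≤ (PySem.List.pyGet? runs (y1 - 1)).getD 0)

def find_safe_cut_y_rows_alt (row_blank : List Bool) (approx_y : Int) (window_px : Int) (min_blank_run : Int) : Int :=
  let h : Int := row_blank.length
  if h = 0 then approx_y
  else
    let ay := max 0 (min approx_y (h - 1))
    let wp := max 0 window_px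
    let mbr := max 1 min_blank_run
    let half := PySem.Int.floordiv mbr 2
    let runs := pvBuildRuns row_blank
    let top := max 0 (ay - wp)
    match (PySem.List.pyRange ay (top - 1) (-1)).find? (pvOkB runs h mbr half) with
    | some y => y - half + mbr
    | none =>
      let bot := min h (ay + wp)
      match (PySem.List.pyRange ay bot 1).find? (pvOkB runs h mbr half) with
      | some y => y - half
      | none => ay

-- ===== PRECONDITION & SPEC =====
def Spec_find_safe_cut_y_rows (row_blank : List Bool) (approx_y : Int) (window_px : Int) (min_blank_run : Int) (out : Int) : Prop := out = find_safe_cut_y_rows_alt row_blank approx_y window_px min_blank_run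
instance (row_blank : List Bool) (approx_y : Int) (window_px : Int) (min_blank_run : Int) (out : Int) : Decidable (Spec_find_safe_cut_y_rows row_blank approx_y window_px min_blank_run out) := by unfold Spec_find_safe_cut_y_rows; infer_instance

-- ===== CLAIM (what is proved, stated in full; the proofs are below) =====
def Claim_equal_find_safe_cut_y_rows : Prop := ∀ (row_blank : List Bool) (approx_y : Int) (window_px : Int) (min_blank_run : Int), Dom_find_safe_cut_y_rows row_blank approx_y window_px min_blank_run → Spec_find_safe_cut_y_rows row_blank approx_y window_px min_blank_run (find_safe_cut_y_rows row_blank approx_y window_px min_blank_run)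

-- ===== LEMMAS AND PROOFS =====

-- structural recursion computing the same run-length list as Source B's loop
def pvRunsFrom (r : Int) : List Bool → List Int
  | [] => []
  | b :: bs => (if b then r + 1 else 0) :: pvRunsFrom (if b then r + 1 else 0) bs

theorem pvRunsFrom_length (bs : List Bool) : ∀ r : Int, (pvRunsFrom r bs).length = bs.length := by
  induction bs with
  | nil => intro r; rfl
  | cons b bs ih => intro r; simp [pvRunsFrom, ih]

theorem pvBuildRuns_go (bs : List Bool) : ∀ (r : Int) (acc : List Int),
    (bs.foldl (fun (st : Int × List Int) b =>
      let r := if b then st.1 + 1 else 0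
      (r, st.2 ++ [r])) (r, acc)).2 = acc ++ pvRunsFrom r bs := by
  induction bs with
  | nil => intro r acc; simp [pvRunsFrom]
  | cons b bs ih => intro r acc; simp [pvRunsFrom, List.foldl_cons, ih]

theorem pvBuildRuns_eq (bs : List Bool) : pvBuildRuns bs = pvRunsFrom 0 bs := by
  simpa [pvBuildRuns] using pvBuildRuns_go bs 0 []

-- run[i] ≥ m  ↔  the m rows ending at i are blank (with carry r available past the left edge)
theorem pvRunsFrom_ge_iff (bs : List Bool) : ∀ (r : Int) (i : Nat) (m : Int),
    0 ≤ r → 1 ≤ m → i < bs.length →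
    (m ≤ (pvRunsFrom r bs).getD i 0 ↔
      ((∀ j : Nat, j ≤ i → (i : Int) - m < (j : Int) → bs.getD j false = true) ∧
        (0 ≤ (i : Int) - m + 1 ∨ m - ((i : Int) + 1) ≤ r))) := by
  induction bs with
  | nil => intro r i m _ _ hi; simp at hi
  | cons b bs ih =>
    intro r i m hr hm hi
    cases i with
    | zero =>
      cases b with
      | false =>
        simp [pvRunsFrom]
        omega
      | true =>
        simp [pvRunsFrom]
        omega
    | succ i =>
      have hr' : (0:Int) ≤ (if b then r + 1 else 0) := by split <;> omega
      have hstep := ih (if b then r + 1 else 0) i m hr' hm (by simpa using hi)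
      simp only [pvRunsFrom, List.getD_cons_succ]
      rw [hstep]
      cases b with
      | true =>
        simp only [reduceIte] at hstep ⊢
        constructor
        · rintro ⟨h1, h2⟩
          refine ⟨?_, by omega⟩
          intro j hj hlt
          cases j with
          | zero => simp
          | succ j => simpa using h1 j (by omega) (by push_cast at hlt ⊢; omega)
        · rintro ⟨h1, h2⟩
          refine ⟨?_, by omega⟩
          intro j hj hlt
          simpa using h1 (j + 1) (by omega) (by push_cast at hlt ⊢; omega)
      | false =>
        simp only [Bool.false_eq_true, reduceIte] at hstep ⊢
        constructor
        · rintro ⟨h1, h2⟩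
          refine ⟨?_, by omega⟩
          intro j hj hlt
          cases j with
          | zero => push_cast at hlt; omega
          | succ j => simpa using h1 j (by omega) (by push_cast at hlt ⊢; omega)
        · rintro ⟨h1, h2⟩
          have hm' : m ≤ (i:Int) + 1 := by
            by_contra hc
            have := h1 0 (by omega) (by push_cast; omega)
            simp at this
          refine ⟨?_, by omega⟩
          intro j hj hlt
          simpa using h1 (j + 1) (by omega) (by push_cast at hlt ⊢; omega)

-- the shared core of both guard tests, stated on the window's left edge y0
theorem pvWin_eq (rb : List Bool) (mbr y0 : Int) (hm : 1 ≤ mbr) :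
    (decide (0 ≤ y0) && decide (y0 + mbr ≤ (rb.length : Int)) &&
      (PySem.List.pyRange y0 (y0 + mbr) 1).all (fun k => (PySem.List.pyGet? rb k).getD false))
    = (decide (0 ≤ y0) && decide (y0 + mbr ≤ (rb.length : Int)) &&
      decide (mbr ≤ (PySem.List.pyGet? (pvRunsFrom 0 rb) (y0 + mbr - 1)).getD 0)) := by
  by_cases h0 : (0:Int) ≤ y0
  swap
  · simp [h0]
  by_cases h1 : y0 + mbr ≤ (rb.length : Int)
  swap
  · simp [h1]
  simp only [h0, h1, decide_true, Bool.true_and]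
  rw [Bool.eq_iff_iff]
  set i : Nat := (y0 + mbr - 1).toNat with hi
  have hic : (i : Int) = y0 + mbr - 1 := by omega
  have hilen : i < rb.length := by omega
  have hget : PySem.List.pyGet? (pvRunsFrom 0 rb) (y0 + mbr - 1)
      = some ((pvRunsFrom 0 rb).getD i 0) := by
    rw [PySem.List.pyGet?_of_nonneg _ (show (0:Int) ≤ y0 + mbr - 1 by omega)]
    have hl : (y0 + mbr - 1).toNat < (pvRunsFrom 0 rb).length := by
      rw [pvRunsFrom_length]; omega
    rw [List.getElem?_eq_getElem hl, List.getD_eq_getElem _ _ (by omega)]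
  simp only [hget, Option.getD_some, List.all_eq_true, decide_eq_true_eq]
  rw [pvRunsFrom_ge_iff rb 0 i mbr le_rfl hm hilen]
  constructor
  · intro hall
    refine ⟨?_, by omega⟩
    intro j hj hlt
    have hmem : (j : Int) ∈ PySem.List.pyRange y0 (y0 + mbr) 1 := by
      rw [PySem.List.mem_pyRange_one]; omega
    have h2 := hall _ hmem
    rw [PySem.List.pyGet?_of_nonneg _ (show (0:Int) ≤ (j:Int) by omega)] at h2
    simpa [List.getD_eq_getElem?_getD] using h2
  · rintro ⟨hall, -⟩
    intro k hk
    rw [PySem.List.mem_pyRange_one] at hk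
    have h2 := hall k.toNat (by omega) (by omega)
    rw [PySem.List.pyGet?_of_nonneg _ (show (0:Int) ≤ k by omega)]
    simpa [List.getD_eq_getElem?_getD] using h2

-- A's inline window scan equals Source B's O(1) table test
theorem pvCheck_eq (rb : List Bool) (mbr y : Int) (hm : 1 ≤ mbr) :
    pvCheckA rb (rb.length : Int) mbr y
      = pvOkB (pvRunsFrom 0 rb) (rb.length : Int) mbr (PySem.Int.floordiv mbr 2) y := by
  unfold pvCheckA pvOkB
  exact pvWin_eq rb mbr (y - PySem.Int.floordiv mbr 2) hm

theorem pvLoopUp_eq (rb : List Bool) (mbr : Int) (hm : 1 ≤ mbr) : ∀ (n : Nat) (y : Int),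
    pvLoopUpA rb (rb.length : Int) mbr n y
      = ((PySem.List.pyRange y (y - (n : Int)) (-1)).find?
          (pvOkB (pvRunsFrom 0 rb) (rb.length : Int) mbr (PySem.Int.floordiv mbr 2))).map
          (fun z => z - PySem.Int.floordiv mbr 2 + mbr) := by
  intro n
  induction n with
  | zero => intro y; simp [pvLoopUpA, PySem.List.pyRange_neg_one_eq_nil (le_refl y)]
  | succ n ih =>
    intro y
    rw [PySem.List.pyRange_neg_one_cons (by push_cast; omega), List.find?_cons]
    simp only [pvLoopUpA, pvCheck_eq rb mbr y hm]
    cases hc : pvOkB (pvRunsFrom 0 rb) (rb.length : Int) mbr (PySem.Int.floordiv mbr 2) y with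
    | true => simp
    | false =>
      simp only [Bool.false_eq_true, if_false]
      have he : y - ((n:Nat) + 1 : Int) = (y - 1) - (n : Int) := by push_cast; ring
      rw [show ((n+1 : Nat) : Int) = ((n:Nat) + 1 : Int) by push_cast; ring, he, ih (y - 1)]

theorem pvLoopDown_eq (rb : List Bool) (mbr : Int) (hm : 1 ≤ mbr) : ∀ (n : Nat) (y : Int),
    pvLoopDownA rb (rb.length : Int) mbr n y
      = ((PySem.List.pyRange y (y + (n : Int)) 1).find?
          (pvOkB (pvRunsFrom 0 rb) (rb.length : Int) mbr (PySem.Int.floordiv mbr 2))).map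
          (fun z => z - PySem.Int.floordiv mbr 2) := by
  intro n
  induction n with
  | zero => intro y; simp [pvLoopDownA, PySem.List.pyRange_one_eq_nil (le_refl y)]
  | succ n ih =>
    intro y
    rw [PySem.List.pyRange_one_cons (by push_cast; omega), List.find?_cons]
    simp only [pvLoopDownA, pvCheck_eq rb mbr y hm]
    cases hc : pvOkB (pvRunsFrom 0 rb) (rb.length : Int) mbr (PySem.Int.floordiv mbr 2) y with
    | true => simp
    | false =>
      simp only [Bool.false_eq_true, if_false]
      have he : y + ((n:Nat) + 1 : Int) = (y + 1) + (n : Int) := by push_cast; ring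
      rw [show ((n+1 : Nat) : Int) = ((n:Nat) + 1 : Int) by push_cast; ring, he, ih (y + 1)]

theorem pvMain_eq (rb : List Bool) (ay wp mbr : Int) :
    find_safe_cut_y_rows rb ay wp mbr = find_safe_cut_y_rows_alt rb ay wp mbr := by
  unfold find_safe_cut_y_rows find_safe_cut_y_rows_alt
  by_cases hh : (rb.length : Int) = 0
  · simp [hh]
  · simp only [if_neg hh]
    have hlen : 1 ≤ (rb.length : Int) := by omega
    set a := max 0 (min ay ((rb.length : Int) - 1)) with ha
    set w := max 0 wp with hw
    set m := max 1 mbr with hmdef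
    have hm : 1 ≤ m := le_max_left _ _
    set top := max 0 (a - w) with htop
    have htopa : top ≤ a := by omega
    have hab : a ≤ min (rb.length : Int) (a + w) := by omega
    rw [pvBuildRuns_eq, pvLoopUp_eq rb m hm, pvLoopDown_eq rb m hm]
    rw [show a - (((a - top + 1).toNat : Nat) : Int) = top - 1 by omega]
    rw [show a + (((min (rb.length : Int) (a + w) - a).toNat : Nat) : Int) = min (rb.length : Int) (a + w) by omega]
    cases hup : (PySem.List.pyRange a (top - 1) (-1)).find?
        (pvOkB (pvRunsFrom 0 rb) (rb.length : Int) m (PySem.Int.floordiv m 2)) with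
    | some z => simp
    | none =>
      simp only [Option.map_none]
      cases hdown : (PySem.List.pyRange a (min (rb.length : Int) (a + w)) 1).find?
          (pvOkB (pvRunsFrom 0 rb) (rb.length : Int) m (PySem.Int.floordiv m 2)) with
      | some z => simp
      | none => simp

-- ===== VERDICT (by name: the statement is the Claim_ definition above) =====
theorem find_safe_cut_y_rows_spec : Claim_equal_find_safe_cut_y_rows := by
  intro rb ay wp mbr _
  unfold Spec_find_safe_cut_y_rows
  exact pvMain_eq rb ay wp mbr
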